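-- pv_equiv track=rewrite | github.com/alf972-del/fm-platform | src/backend/middleware/auth.py | _extract_user_type
-- ===== SOURCE A (Python) =====
-- def _extract_user_type(roles: list[str]) -> str:
--     """Mapea roles de Keycloak a user_type del sistema."""
--     role_priority = {
--         "fm-admin":          "admin",
--         "fm-staff":          "staff",
--         "fm-technician":     "technician",
--         "fm-vendor":         "vendor",
--         "fm-tenant-contact": "tenant_contact",
--     }
--     for role_key, user_type in role_priority.items():
--         if role_key in roles:
--             return user_type
--     return "tenant_contact"  # Default mínimo
-- ===== SOURCE B (Python) =====
-- _RANK = {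
--     "fm-admin": 0,
--     "fm-staff": 1,
--     "fm-technician": 2,
--     "fm-vendor": 3,
--     "fm-tenant-contact": 4,
-- }
-- _TYPES = ["admin", "staff", "technician", "vendor", "tenant_contact"]
--
--
-- def _extract_user_type(roles: list[str]) -> str:
--     """Single pass over roles keeping the best (smallest) priority rank."""
--     best = 5
--     for r in roles:
--         k = _RANK.get(r, 5)
--         if k < best:
--             best = k
--     return _TYPES[best] if best < 5 else "tenant_contact"
-- ===== Notes on version B (the rewrite author's own statement) =====
-- stated objective: alternative
-- what changed: Replaces the per-priority membership scans over roles (one 'role_key in roles' scan per dict entry) by a single argmin pass over roles that tracks the smallest priority rank seen, mapping the best rank to its user_type at the end.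
import Mathlib
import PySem

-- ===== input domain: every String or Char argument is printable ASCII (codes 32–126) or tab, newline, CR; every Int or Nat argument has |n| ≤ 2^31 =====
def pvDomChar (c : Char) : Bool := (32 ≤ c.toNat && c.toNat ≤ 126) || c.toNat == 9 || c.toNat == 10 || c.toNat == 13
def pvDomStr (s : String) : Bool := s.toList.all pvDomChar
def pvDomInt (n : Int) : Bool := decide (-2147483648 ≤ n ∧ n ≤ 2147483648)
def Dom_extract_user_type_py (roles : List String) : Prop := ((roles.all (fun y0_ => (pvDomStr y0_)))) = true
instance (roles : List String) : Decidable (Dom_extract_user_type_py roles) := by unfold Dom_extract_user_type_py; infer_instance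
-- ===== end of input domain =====

-- B replaces A's per-priority membership scans by one argmin pass over roles (alternative decomposition, same cost class).


-- ===== PORT A =====
def extract_user_type_py (roles : List String) : String :=
  -- literal port of A: the dict iteration unrolled in insertion order, 'role_key in roles' = membership test
  if roles.contains "fm-admin" then "admin"
  else if roles.contains "fm-staff" then "staff"
  else if roles.contains "fm-technician" then "technician"
  else if roles.contains "fm-vendor" then "vendor"
  else if roles.contains "fm-tenant-contact" then "tenant_contact"
  else "tenant_contact"

-- ===== PORT B =====
-- _RANK.get(r, 5)
def pvRankOf (r : String) : Nat :=
  if r = "fm-admin" then 0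
  else if r = "fm-staff" then 1
  else if r = "fm-technician" then 2
  else if r = "fm-vendor" then 3
  else if r = "fm-tenant-contact" then 4
  else 5

-- _TYPES[best] if best < 5 else "tenant_contact"
def pvTypeOf (k : Nat) : String :=
  if k < 5 then ["admin", "staff", "technician", "vendor", "tenant_contact"].getD k "tenant_contact"
  else "tenant_contact"

def extract_user_type_py_alt (roles : List String) : String :=
  let best := roles.foldl (fun acc r => let k := pvRankOf r; if k < acc then k else acc) 5
  pvTypeOf best

-- ===== PRECONDITION & SPEC =====
def Spec_extract_user_type_py (roles : List String) (out : String) : Prop := out = extract_user_type_py_alt roles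
instance (roles : List String) (out : String) : Decidable (Spec_extract_user_type_py roles out) := by unfold Spec_extract_user_type_py; infer_instance

-- ===== CLAIM (what is proved, stated in full; the proofs are below) =====
def Claim_equal_extract_user_type_py : Prop := ∀ (roles : List String), Dom_extract_user_type_py roles → Spec_extract_user_type_py roles (extract_user_type_py roles)

-- ===== LEMMAS AND PROOFS =====
-- rank of the first matching priority level of A's scan (5 = none matched)
def pvIdx (l : List String) : Nat :=
  if l.contains "fm-admin" then 0
  else if l.contains "fm-staff" then 1
  else if l.contains "fm-technician" then 2
  else if l.contains "fm-vendor" then 3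
  else if l.contains "fm-tenant-contact" then 4
  else 5

lemma pvFold_min (l : List String) : ∀ (a b : Nat),
    l.foldl (fun acc r => let k := pvRankOf r; if k < acc then k else acc) (min a b)
      = min a (l.foldl (fun acc r => let k := pvRankOf r; if k < acc then k else acc) b) := by
  induction l with
  | nil => intro a b; simp
  | cons r t ih =>
    intro a b
    simp only [List.foldl_cons]
    have h1 : (if pvRankOf r < min a b then pvRankOf r else min a b)
        = min a (min b (pvRankOf r)) := by split <;> omega
    have h2 : (if pvRankOf r < b then pvRankOf r else b) = min b (pvRankOf r) := by
      split <;> omega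
    rw [h1, h2, ← ih]

lemma pvIdx_cons (r : String) (t : List String) :
    pvIdx (r :: t) = min (pvRankOf r) (pvIdx t) := by
  by_cases h0 : r = "fm-admin"
  · subst h0
    simp only [pvIdx, pvRankOf, List.contains_cons, String.reduceBEq, BEq.rfl, Bool.true_or,
      Bool.false_or, if_true, String.reduceEq, reduceIte]
    split_ifs <;> omega
  by_cases h1 : r = "fm-staff"
  · subst h1
    simp only [pvIdx, pvRankOf, List.contains_cons, String.reduceBEq, BEq.rfl, Bool.true_or,
      Bool.false_or, if_true, String.reduceEq, reduceIte]
    split_ifs <;> omega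
  by_cases h2 : r = "fm-technician"
  · subst h2
    simp only [pvIdx, pvRankOf, List.contains_cons, String.reduceBEq, BEq.rfl, Bool.true_or,
      Bool.false_or, if_true, String.reduceEq, reduceIte]
    split_ifs <;> omega
  by_cases h3 : r = "fm-vendor"
  · subst h3
    simp only [pvIdx, pvRankOf, List.contains_cons, String.reduceBEq, BEq.rfl, Bool.true_or,
      Bool.false_or, if_true, String.reduceEq, reduceIte]
    split_ifs <;> omega
  by_cases h4 : r = "fm-tenant-contact"
  · subst h4
    simp only [pvIdx, pvRankOf, List.contains_cons, String.reduceBEq, BEq.rfl, Bool.true_or,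
      Bool.false_or, if_true, String.reduceEq, reduceIte]
    split_ifs <;> omega
  · have e0 : ("fm-admin" == r) = false := beq_eq_false_iff_ne.mpr (fun h => h0 h.symm)
    have e1 : ("fm-staff" == r) = false := beq_eq_false_iff_ne.mpr (fun h => h1 h.symm)
    have e2 : ("fm-technician" == r) = false := beq_eq_false_iff_ne.mpr (fun h => h2 h.symm)
    have e3 : ("fm-vendor" == r) = false := beq_eq_false_iff_ne.mpr (fun h => h3 h.symm)
    have e4 : ("fm-tenant-contact" == r) = false := beq_eq_false_iff_ne.mpr (fun h => h4 h.symm)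
    simp only [pvIdx, pvRankOf, List.contains_cons, e0, e1, e2, e3, e4, Bool.false_or,
      if_neg h0, if_neg h1, if_neg h2, if_neg h3, if_neg h4]
    split_ifs <;> omega

lemma pvFold_eq_idx (l : List String) :
    l.foldl (fun acc r => let k := pvRankOf r; if k < acc then k else acc) 5 = pvIdx l := by
  induction l with
  | nil => simp [pvIdx]
  | cons r t ih =>
    simp only [List.foldl_cons]
    have h5 : (if pvRankOf r < 5 then pvRankOf r else 5) = min (pvRankOf r) 5 := by
      split <;> omega
    rw [h5, pvFold_min t (pvRankOf r) 5, ih, pvIdx_cons]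

-- ===== VERDICT (by name: the statement is the Claim_ definition above) =====
theorem extract_user_type_py_spec : Claim_equal_extract_user_type_py := by
  intro roles _
  unfold Spec_extract_user_type_py extract_user_type_py extract_user_type_py_alt
  rw [pvFold_eq_idx]
  unfold pvIdx pvTypeOf
  split_ifs <;> rfl
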